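-- pv_equiv track=rewrite | github.com/J4MIE1P/GamesCrafters | 3x3x2TTTOneLine/fileTTTsolver.py | hashTTT
-- ===== SOURCE A (Python) =====
-- def hashTTT(position):
--     index = 0
--     s = position[2:11] + position[12:21]
--     for i in range(len(s)):
--         if s[i] == "-":
--             index += (3**i) * 0
--         elif s[i] == "X":
--             index += (3**i) * 1
--         elif s[i] == "O":
--             index += (3**i) * 2
--     return index
-- ===== SOURCE B (Python) =====
-- def hashTTT(position):
--     s = position[2:11] + position[12:21]
--     digit = {"X": 1, "O": 2}
--     index = 0
--     for c in reversed(s):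
--         index = index * 3 + digit.get(c, 0)
--     return index
-- ===== Notes on version B (the rewrite author's own statement) =====
-- stated objective: alternative
-- what changed: Replaces the forward sum of independent 3**i terms (recomputing the power each iteration) with Horner's method: a single multiply-accumulate pass over the reversed slice using a default-0 digit map.
import Mathlib
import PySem

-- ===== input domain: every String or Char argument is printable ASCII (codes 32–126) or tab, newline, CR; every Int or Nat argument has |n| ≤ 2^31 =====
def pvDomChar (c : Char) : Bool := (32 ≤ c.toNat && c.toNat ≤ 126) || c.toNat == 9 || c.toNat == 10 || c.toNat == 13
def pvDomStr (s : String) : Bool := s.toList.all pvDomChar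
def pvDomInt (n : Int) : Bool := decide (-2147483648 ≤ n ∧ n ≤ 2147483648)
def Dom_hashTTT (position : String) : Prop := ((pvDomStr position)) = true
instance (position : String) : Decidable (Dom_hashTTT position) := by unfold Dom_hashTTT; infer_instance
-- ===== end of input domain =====

-- ===== PORT A =====
-- A sums (3**i) * digit over the slice, recomputing the power each step.
def hashTTT (position : String) : Int :=
  let s : List Char :=
    PySem.List.slice position.toList (some 2) (some 11) ++
    PySem.List.slice position.toList (some 12) (some 21)
  (PySem.List.pyRange 0 (s.length : Int) 1).foldl
    (fun index i =>
      let c := PySem.List.pyGetD s i ' '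
      if c = '-' then index + 3 ^ i.toNat * 0
      else if c = 'X' then index + 3 ^ i.toNat * 1
      else if c = 'O' then index + 3 ^ i.toNat * 2
      else index) 0

-- ===== PORT B =====
-- B: Horner's method — one multiply-accumulate pass over the reversed slice, digits from a default-0 map.
def hashTTT_alt (position : String) : Int :=
  let s : List Char :=
    PySem.List.slice position.toList (some 2) (some 11) ++
    PySem.List.slice position.toList (some 12) (some 21)
  let digit : PySem.Dict Char Int := PySem.Dict.ofList [('X', 1), ('O', 2)]
  s.reverse.foldl (fun index c => index * 3 + digit.getD c 0) 0

-- ===== PRECONDITION & SPEC =====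
def Spec_hashTTT (position : String) (out : Int) : Prop := out = hashTTT_alt position
instance (position : String) (out : Int) : Decidable (Spec_hashTTT position out) := by unfold Spec_hashTTT; infer_instance

-- ===== CLAIM (what is proved, stated in full; the proofs are below) =====
def Claim_equal_hashTTT : Prop := ∀ (position : String), Dom_hashTTT position → Spec_hashTTT position (hashTTT position)

-- ===== LEMMAS AND PROOFS =====

-- digit value of one character, as both programs assign it
def dig (c : Char) : Int := if c = 'X' then 1 else if c = 'O' then 2 else 0

-- base-3 value of a digit string, least-significant first
def H : List Char → Int
  | [] => 0
  | c :: t => dig c + 3 * H t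

theorem getD_digit (c : Char) :
    (PySem.Dict.ofList [('X', (1:Int)), ('O', 2)]).getD c 0 = dig c := by
  have hd : PySem.Dict.ofList [('X', (1:Int)), ('O', 2)] = PySem.Dict.mk [('X', 1), ('O', 2)] := by
    decide
  rw [hd]
  by_cases h1 : c = 'X'
  · subst h1; decide
  by_cases h2 : c = 'O'
  · subst h2; decide
  have b1 : ('X' == c) = false := beq_eq_false_iff_ne.mpr fun h => h1 h.symm
  have b2 : ('O' == c) = false := beq_eq_false_iff_ne.mpr fun h => h2 h.symm
  simp [PySem.Dict.getD, PySem.Dict.get?, List.find?, b1, b2, dig, h1, h2]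

theorem horner_rev (l : List Char) : ∀ (a : Int),
    l.reverse.foldl (fun index c =>
      index * 3 + (PySem.Dict.ofList [('X', (1:Int)), ('O', 2)]).getD c 0) a
      = a * 3 ^ l.length + H l := by
  induction l with
  | nil => intro a; simp [H]
  | cons c t ih =>
      intro a
      rw [List.reverse_cons, List.foldl_append, ih]
      simp only [List.foldl_cons, List.foldl_nil, getD_digit, H, List.length_cons]
      ring

theorem bodyEq (index : Int) (n : Nat) (c : Char) :
    (if c = '-' then index + 3 ^ n * 0
     else if c = 'X' then index + 3 ^ n * 1
     else if c = 'O' then index + 3 ^ n * 2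
     else index) = index + 3 ^ n * dig c := by
  unfold dig
  split_ifs <;> simp_all

theorem sumA (s : List Char) : ∀ (t : List Char) (j : Nat), s.drop j = t → ∀ (a : Int),
    (PySem.List.pyRange (j : Int) (s.length : Int) 1).foldl
      (fun index i =>
        let c := PySem.List.pyGetD s i ' '
        if c = '-' then index + 3 ^ i.toNat * 0
        else if c = 'X' then index + 3 ^ i.toNat * 1
        else if c = 'O' then index + 3 ^ i.toNat * 2
        else index) a
      = a + 3 ^ j * H t := by
  intro t
  induction t with
  | nil =>
      intro j hd a
      have hj : s.length ≤ j := by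
        by_contra h
        have := List.drop_eq_nil_iff.mp hd
        omega
      rw [PySem.List.pyRange_one_eq_nil (by exact_mod_cast hj)]
      simp [H]
  | cons c t' ih =>
      intro j hd a
      have hj : j < s.length := by
        by_contra h
        rw [List.drop_eq_nil_of_le (by omega)] at hd
        exact List.cons_ne_nil c t' hd.symm
      have hc : s[j]? = some c := by
        have h0 : (s.drop j)[0]? = some c := by rw [hd]; rfl
        rw [List.getElem?_drop] at h0
        simpa using h0
      have hget : PySem.List.pyGetD s (j : Int) ' ' = c := by
        rw [PySem.List.pyGetD_natCast, List.getD_eq_getElem?_getD, hc]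
        rfl
      have hd' : s.drop (j + 1) = t' := by
        rw [← List.drop_drop, hd]; rfl
      have step : ((j : Int) + 1) = ((j + 1 : Nat) : Int) := by push_cast; ring
      rw [PySem.List.pyRange_one_cons (by exact_mod_cast hj), List.foldl_cons, step,
        ih (j + 1) hd']
      simp only [hget, Int.toNat_natCast]
      rw [bodyEq]
      simp only [H, pow_succ]
      ring

-- ===== VERDICT =====
theorem hashTTT_spec : Claim_equal_hashTTT := by
  intro position _
  unfold Spec_hashTTT hashTTT hashTTT_alt
  set s : List Char :=
    PySem.List.slice position.toList (some 2) (some 11) ++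
    PySem.List.slice position.toList (some 12) (some 21) with hs
  have hA := sumA s s 0 rfl 0
  have hB := horner_rev s 0
  simp only [Nat.cast_zero] at hA
  simp only [PySem.Dict.ofList] at hB ⊢
  rw [hA, hB]
  ring
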